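-- pv_equiv track=rewrite | github.com/jforsyth/ENGR280-Python | step-count/walking_data.py | _find_maxima_groups
-- ===== SOURCE A (Python) =====
-- def _find_maxima_groups(maxima_array, spacing):
--     """
--     Finds groups of local maximas based on
--         spacing from one another.
--
--     Parameters:
--     maxima_array (list): List containing indicies of maximas
--     spacing (int): Maximum distance between points to still
--         be considered in a group
--
--     Returns:
--     list of lists: Indcies representing "groups" of maximas
--     """
--     groups = []
--     start = maxima_array[0]
--     end = maxima_array[0]
--     for i in range(0, len(maxima_array) - 1):
--         if maxima_array[i+1] - maxima_array[i] > spacing: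
--             end = maxima_array[i]
--             groups.append([start, end])
--             start = maxima_array[i + 1]
--         if i == len(maxima_array) - 2:
--             end = maxima_array[-1]
--             groups.append([start, end])
--
--     return groups
-- ===== SOURCE B (Python) =====
-- def _find_maxima_groups(maxima_array, spacing):
--     """Two staged passes: first compute all cut positions (indices where the gap
--     exceeds spacing), then assemble the groups by zipping group-start indices
--     with group-end indices."""
--     n = len(maxima_array)
--     cuts = [i for i in range(n - 1)
--             if maxima_array[i + 1] - maxima_array[i] > spacing]
--     starts = [0] + [c + 1 for c in cuts]
--     ends = cuts + [n - 1]
--     return [[maxima_array[s], maxima_array[e]] for s, e in zip(starts, ends)]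
-- ===== Notes on version B (the rewrite author's own statement) =====
-- stated objective: alternative
-- what changed: B replaces A's single stateful fold (running start/end variables plus an i==len-2 test inside the loop) by two staged passes: it first materialises the list of cut indices where the gap exceeds spacing, then builds the output by zipping the derived start indices with the end indices.
-- intended difference: On a single-element list A returns [] (its final-group append only fires at index len-2, which the loop never reaches), while B returns [[x, x]]: one maximum forms one group, which is the intended value. — e.g. on _find_maxima_groups([5], 2): A returns [], B returns [[5, 5]]
import Mathlib
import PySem

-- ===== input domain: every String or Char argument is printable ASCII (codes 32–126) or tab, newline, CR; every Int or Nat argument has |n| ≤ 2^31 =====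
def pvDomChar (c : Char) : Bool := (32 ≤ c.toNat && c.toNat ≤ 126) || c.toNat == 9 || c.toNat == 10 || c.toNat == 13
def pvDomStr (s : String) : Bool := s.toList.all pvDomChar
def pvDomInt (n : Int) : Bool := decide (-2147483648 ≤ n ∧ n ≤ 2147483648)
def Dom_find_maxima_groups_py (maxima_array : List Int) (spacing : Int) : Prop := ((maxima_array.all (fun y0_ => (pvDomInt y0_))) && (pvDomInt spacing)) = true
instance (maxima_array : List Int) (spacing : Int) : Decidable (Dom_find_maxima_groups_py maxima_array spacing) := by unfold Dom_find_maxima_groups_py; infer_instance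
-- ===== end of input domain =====

-- B builds the list of cut indices first and then assembles groups by zipping start
-- with end indices (objective: alternative, two staged passes instead of A's stateful fold);
-- on a single-element list A returns [] while B returns [[x,x]] (intended; see D_ below).


-- ===== PORT A =====
def find_maxima_groups_py (maxima_array : List Int) (spacing : Int) : List (List Int) :=
  let groups : List (List Int) := []
  let start := PySem.List.pyGetD maxima_array 0 0
  let endv := PySem.List.pyGetD maxima_array 0 0
  -- for i in range(0, len(maxima_array) - 1):
  let st := (PySem.List.pyRange 0 ((maxima_array.length : Int) - 1) 1).foldl
    (fun (st : List (List Int) × Int × Int) i =>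
      let st1 :=
        if PySem.List.pyGetD maxima_array (i+1) 0 - PySem.List.pyGetD maxima_array i 0 > spacing then
          (st.1 ++ [[st.2.1, PySem.List.pyGetD maxima_array i 0]],
           PySem.List.pyGetD maxima_array (i+1) 0,
           PySem.List.pyGetD maxima_array i 0)
        else st
      if i = (maxima_array.length : Int) - 2 then
        (st1.1 ++ [[st1.2.1, PySem.List.pyGetD maxima_array (-1) 0]],
         st1.2.1, PySem.List.pyGetD maxima_array (-1) 0)
      else st1)
    (groups, start, endv)
  st.1

-- ===== PORT B =====
def find_maxima_groups_py_alt (maxima_array : List Int) (spacing : Int) : List (List Int) :=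
  let n : Int := maxima_array.length
  -- cuts = [i for i in range(n - 1) if maxima_array[i+1] - maxima_array[i] > spacing]
  let cuts := (PySem.List.pyRange 0 (n - 1) 1).filter
    (fun i => decide (PySem.List.pyGetD maxima_array (i + 1) 0 - PySem.List.pyGetD maxima_array i 0 > spacing))
  -- starts = [0] + [c + 1 for c in cuts];  ends = cuts + [n - 1]
  let starts := (0 : Int) :: cuts.map (fun c => c + 1)
  let ends := cuts ++ [n - 1]
  (starts.zip ends).map
    (fun p => [PySem.List.pyGetD maxima_array p.1 0, PySem.List.pyGetD maxima_array p.2 0])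

-- ===== PRECONDITION & SPEC =====
-- Pre_ excludes the empty list, on which A raises IndexError at maxima_array[0] (B raises there too).
def Pre_find_maxima_groups_py (maxima_array : List Int) (spacing : Int) : Prop := maxima_array ≠ []
instance (maxima_array : List Int) (spacing : Int) : Decidable (Pre_find_maxima_groups_py maxima_array spacing) := by unfold Pre_find_maxima_groups_py; infer_instance
def pvWitness_find_maxima_groups_py : List Int × Int := ([1, 2, 10], 3)

-- On a single-element list A returns [] (its final-group append only fires at index len-2, which the
-- loop never reaches), while B returns [[x, x]]: one maximum forms one group, the intended value.
def D_find_maxima_groups_py (maxima_array : List Int) (spacing : Int) : Prop := maxima_array.length = 1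
instance (maxima_array : List Int) (spacing : Int) : Decidable (D_find_maxima_groups_py maxima_array spacing) := by unfold D_find_maxima_groups_py; infer_instance

def Spec_find_maxima_groups_py (maxima_array : List Int) (spacing : Int) (out : List (List Int)) : Prop := ¬ D_find_maxima_groups_py maxima_array spacing → out = find_maxima_groups_py_alt maxima_array spacing
instance (maxima_array : List Int) (spacing : Int) (out : List (List Int)) : Decidable (Spec_find_maxima_groups_py maxima_array spacing out) := by unfold Spec_find_maxima_groups_py; infer_instance

def pvDiffWitness_find_maxima_groups_py : List Int × Int := ([5], 2)
def pvDiffWitnessOut_find_maxima_groups_py : (List (List Int)) × (List (List Int)) := ([], [[5, 5]])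

-- ===== CLAIM (what is proved, stated in full; the proofs are below) =====
def Claim_unchanged_find_maxima_groups_py : Prop := ∀ (maxima_array : List Int) (spacing : Int), Dom_find_maxima_groups_py maxima_array spacing → Pre_find_maxima_groups_py maxima_array spacing → Spec_find_maxima_groups_py maxima_array spacing (find_maxima_groups_py maxima_array spacing)
def Claim_changed_find_maxima_groups_py : Prop := Dom_find_maxima_groups_py (pvDiffWitness_find_maxima_groups_py.1) (pvDiffWitness_find_maxima_groups_py.2) ∧ Pre_find_maxima_groups_py (pvDiffWitness_find_maxima_groups_py.1) (pvDiffWitness_find_maxima_groups_py.2) ∧ D_find_maxima_groups_py (pvDiffWitness_find_maxima_groups_py.1) (pvDiffWitness_find_maxima_groups_py.2) ∧ find_maxima_groups_py (pvDiffWitness_find_maxima_groups_py.1) (pvDiffWitness_find_maxima_groups_py.2) = pvDiffWitnessOut_find_maxima_groups_py.1 ∧ find_maxima_groups_py_alt (pvDiffWitness_find_maxima_groups_py.1) (pvDiffWitness_find_maxima_groups_py.2) = pvDiffWitnessOut_find_maxima_groups_py.2 ∧ pvDiffWitnessOut_find_maxima_groups_py.1 ≠ pvDiffWitnessOut_fi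nd_maxima_groups_py.2
def Claim_exact_find_maxima_groups_py : Prop := ∀ (maxima_array : List Int) (spacing : Int), Dom_find_maxima_groups_py maxima_array spacing → Pre_find_maxima_groups_py maxima_array spacing → D_find_maxima_groups_py maxima_array spacing → find_maxima_groups_py maxima_array spacing ≠ find_maxima_groups_py_alt maxima_array spacing

-- ===== LEMMAS AND PROOFS =====

-- The canonical grouping recursion both ports are reduced to (s = current group start, a = previous element).
def chop (spacing s a : Int) : List Int → List (List Int)
  | [] => [[s, a]]
  | b :: rest => if b - a > spacing then [s, a] :: chop spacing b b rest else chop spacing s b rest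

-- ---------- A side ----------

-- A's loop body, re-expressed over a Nat index (bridged to the port in A_bridge).
def stepA (spacing : Int) (m : List Int) (st : List (List Int) × Int × Int) (k : Nat) : List (List Int) × Int × Int :=
  let st1 :=
    if m.getD (k+1) 0 - m.getD k 0 > spacing then
      (st.1 ++ [[st.2.1, m.getD k 0]], m.getD (k+1) 0, m.getD k 0)
    else st
  if k = m.length - 2 then
    (st1.1 ++ [[st1.2.1, m.getLast?.getD 0]], st1.2.1, m.getLast?.getD 0)
  else st1

theorem stepA_shift (spacing a : Int) (rest : List Int) (st : List (List Int) × Int × Int)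
    (k : Nat) (hk : k < rest.length - 1) :
    stepA spacing (a :: rest) st (k+1) = stepA spacing rest st k := by
  have h2 : (a :: rest).getLast? = rest.getLast? := by
    cases rest with
    | nil => exact absurd hk (by simp)
    | cons b r => simp [List.getLast?_cons_cons]
  have h1 : (k + 1 = rest.length + 1 - 2) ↔ (k = rest.length - 2) := by omega
  unfold stepA
  simp only [List.getD_cons_succ, List.length_cons, h1, h2]

theorem A_run (spacing : Int) : ∀ (rest : List Int) (a s e : Int) (g : List (List Int)),
    ((List.range ((a :: rest).length - 1)).foldl (stepA spacing (a :: rest)) (g, s, e)).1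
      = g ++ (if rest = [] then [] else chop spacing s a rest) := by
  intro rest
  induction rest with
  | nil => intro a s e g; simp
  | cons b r ih =>
    intro a s e g
    have hlen : (a :: b :: r).length - 1 = r.length + 1 := by simp
    rw [hlen, List.range_succ_eq_map, List.foldl_cons, List.foldl_map]
    have hcongr : (List.range r.length).foldl
        (fun st k => stepA spacing (a :: b :: r) st (k+1)) (stepA spacing (a :: b :: r) (g, s, e) 0)
      = (List.range r.length).foldl (stepA spacing (b :: r)) (stepA spacing (a :: b :: r) (g, s, e) 0) := by
      apply PySem.List.foldl_congr_mem
      intro st k hk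
      have hk' : k < (b :: r).length - 1 := by
        simp only [List.length_cons]; exact Nat.lt_of_lt_of_le (List.mem_range.mp hk) (by omega)
      exact stepA_shift spacing a (b :: r) st k hk'
    rw [hcongr]
    have hc : (0 = (a :: b :: r).length - 2) ↔ r = [] := by cases r <;> simp
    have hstep0 : stepA spacing (a :: b :: r) (g, s, e) 0
        = if r = [] then
            (if b - a > spacing
              then (g ++ [[s, a]] ++ [[b, (a :: b :: r).getLast?.getD 0]], b, (a :: b :: r).getLast?.getD 0)
              else (g ++ [[s, (a :: b :: r).getLast?.getD 0]], s, (a :: b :: r).getLast?.getD 0))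
          else (if b - a > spacing then (g ++ [[s, a]], b, a) else (g, s, e)) := by
      by_cases hr : r = []
      · by_cases hg : b - a > spacing <;> simp [stepA, hc, hr, hg]
      · have hr0 : ¬ (0 = r.length) := fun h => hr (List.length_eq_zero_iff.mp h.symm)
        by_cases hg : b - a > spacing <;> simp [stepA, hr, hg, hr0]
    by_cases hr : r = []
    · subst hr
      rw [hstep0]
      by_cases hg : b - a > spacing <;> simp [hg, chop]
    · rw [hstep0, if_neg hr]
      by_cases hg : b - a > spacing
      · rw [if_pos hg]
        have ih' := ih b b a (g ++ [[s, a]])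
        simp only [List.length_cons, Nat.add_sub_cancel, if_neg hr] at ih'
        rw [ih']
        simp [chop, hg]
      · rw [if_neg hg]
        have ih' := ih b s e g
        simp only [List.length_cons, Nat.add_sub_cancel, if_neg hr] at ih'
        rw [ih']
        simp [chop, hg]

theorem A_bridge (m : List Int) (spacing : Int) (hm : m ≠ []) :
    find_maxima_groups_py m spacing
      = ((List.range (m.length - 1)).foldl (stepA spacing m) ([], m.getD 0 0, m.getD 0 0)).1 := by
  have hlen : 1 ≤ m.length := by
    cases m with | nil => exact absurd rfl hm | cons a t => simp
  unfold find_maxima_groups_py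
  dsimp only
  rw [PySem.List.pyRange_one]
  have ht : (((m.length : Int) - 1) - 0).toNat = m.length - 1 := by omega
  rw [ht, List.foldl_map]
  have hinit : PySem.List.pyGetD m 0 0 = m.getD 0 0 := by
    rw [show (0 : Int) = ((0 : Nat) : Int) from rfl, PySem.List.pyGetD_natCast]
  rw [hinit]
  congr 1
  apply PySem.List.foldl_congr_mem
  intro st k hk
  have hk' : k < m.length - 1 := List.mem_range.mp hk
  have e1 : PySem.List.pyGetD m (0 + (k : Int)) 0 = m.getD k 0 := by
    rw [zero_add, PySem.List.pyGetD_natCast]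
  have e2 : PySem.List.pyGetD m (0 + (k : Int) + 1) 0 = m.getD (k+1) 0 := by
    rw [zero_add, show ((k : Int) + 1) = ((k + 1 : Nat) : Int) by push_cast; ring,
        PySem.List.pyGetD_natCast]
  have e3 : PySem.List.pyGetD m (-1) 0 = m.getLast?.getD 0 := by
    rw [PySem.List.pyGetD_neg_one m 0 hm]
    cases m with
    | nil => exact absurd rfl hm
    | cons a t => simp [List.getLast?_eq_some_getLast]
  have e4 : (0 + (k : Int) = (m.length : Int) - 2) ↔ (k = m.length - 2) := by omega
  unfold stepA
  simp only [e1, e2, e3, e4]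

theorem A_eq_chop (a b : Int) (rest : List Int) (spacing : Int) :
    find_maxima_groups_py (a :: b :: rest) spacing = chop spacing a a (b :: rest) := by
  rw [A_bridge (a :: b :: rest) spacing (by simp)]
  have h := A_run spacing (b :: rest) a a a []
  simp only [List.getD_cons_zero]
  rw [h]
  simp

-- ---------- B side ----------

-- The cut positions over Nat indices.
def cutsN (spacing : Int) (m : List Int) : List Nat :=
  (List.range (m.length - 1)).filter (fun k => decide (m.getD (k+1) 0 - m.getD k 0 > spacing))

theorem cutsN_cons_cons (spacing a b : Int) (r : List Int) :
    cutsN spacing (a :: b :: r)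
      = (if b - a > spacing then [0] else []) ++ (cutsN spacing (b :: r)).map Nat.succ := by
  unfold cutsN
  have hlen : (a :: b :: r).length - 1 = r.length + 1 := by simp
  rw [hlen, List.range_succ_eq_map, List.filter_cons, List.filter_map]
  have hfun : ((fun k => decide ((a :: b :: r).getD (k+1) 0 - (a :: b :: r).getD k 0 > spacing)) ∘ Nat.succ)
      = (fun k => decide ((b :: r).getD (k+1) 0 - (b :: r).getD k 0 > spacing)) := by
    funext k
    simp [Function.comp, List.getD_cons_succ]
  rw [hfun]
  have h0 : (a :: b :: r).getD 1 0 - (a :: b :: r).getD 0 0 = b - a := by simp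
  simp only [List.length_cons, Nat.add_sub_cancel, h0]
  by_cases hg : b - a > spacing <;> simp [hg]

theorem chop_cuts (spacing : Int) : ∀ (rest : List Int) (a s : Int),
    ((s :: (cutsN spacing (a :: rest)).map (fun c => (a :: rest).getD (c+1) 0)).zip
      ((cutsN spacing (a :: rest)).map (fun c => (a :: rest).getD c 0) ++ [(a :: rest).getLast?.getD 0])).map
      (fun p => [p.1, p.2])
    = chop spacing s a rest := by
  intro rest
  induction rest with
  | nil => intro a s; simp [cutsN, chop]
  | cons b r ih =>
    intro a s
    rw [cutsN_cons_cons]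
    have hlast : (a :: b :: r).getLast? = (b :: r).getLast? := List.getLast?_cons_cons
    have h1 : ((fun c => (a :: b :: r).getD (c+1) 0) ∘ Nat.succ)
        = (fun c => (b :: r).getD (c+1) 0) := by
      funext c; simp [Function.comp, Nat.succ_eq_add_one, List.getD_cons_succ]
    have h2 : ((fun c => (a :: b :: r).getD c 0) ∘ Nat.succ)
        = (fun c => (b :: r).getD c 0) := by
      funext c; simp [Function.comp, Nat.succ_eq_add_one, List.getD_cons_succ]
    have h3 : ((fun c => (b :: r).getD c 0) ∘ Nat.succ)
        = (fun c => (b :: r).getD (c+1) 0) := by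
      funext c; simp [Function.comp, Nat.succ_eq_add_one]
    have h4 : (fun c => (b :: r).getD (c+1) 0) = (fun c : Nat => r.getD c 0) := by
      funext c; simp
    by_cases hg : b - a > spacing
    · rw [if_pos hg]
      simp only [List.cons_append, List.nil_append, List.map_cons, List.map_map,
        List.map_append, List.zip_cons_cons, hlast, h1, h2, h3,
        List.getD_cons_succ, List.getD_cons_zero]
      rw [show chop spacing s a (b :: r) = [s, a] :: chop spacing b b r from by
        simp [chop, hg]]
      rw [← ih b b]
      simp only [h4]
    · rw [if_neg hg]
      simp only [List.nil_append, List.map_map, List.map_append, hlast, h1, h2, h3,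
        List.map_cons, List.getD_cons_succ, List.getD_cons_zero]
      rw [show chop spacing s a (b :: r) = chop spacing s b r from by simp [chop, hg]]
      rw [← ih b s]
      simp only [h4]

theorem getD_last (m : List Int) :
    m.getD (m.length - 1) 0 = m.getLast?.getD 0 := by
  rw [List.getD_eq_getElem?_getD, List.getLast?_eq_getElem?]

theorem B_bridge (m : List Int) (spacing : Int) (hm : m ≠ []) :
    find_maxima_groups_py_alt m spacing
      = ((((0 : Nat) :: (cutsN spacing m).map Nat.succ).zip (cutsN spacing m ++ [m.length - 1])).map
          (fun p => [m.getD p.1 0, m.getD p.2 0])) := by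
  have hlen : 1 ≤ m.length := by
    cases m with | nil => exact absurd rfl hm | cons a t => simp
  unfold find_maxima_groups_py_alt
  dsimp only
  rw [PySem.List.pyRange_one]
  have ht : (((m.length : Int) - 1) - 0).toNat = m.length - 1 := by omega
  rw [ht, List.filter_map]
  have hfun : ((fun i => decide (PySem.List.pyGetD m (i + 1) 0 - PySem.List.pyGetD m i 0 > spacing)) ∘ (fun k : Nat => (0 : Int) + k))
      = (fun k : Nat => decide (m.getD (k+1) 0 - m.getD k 0 > spacing)) := by
    funext k
    simp only [Function.comp_apply, zero_add]
    rw [show ((k : Int) + 1) = ((k + 1 : Nat) : Int) by push_cast; ring,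
        PySem.List.pyGetD_natCast, PySem.List.pyGetD_natCast]
  rw [hfun]
  rw [show List.filter (fun k => decide (m.getD (k + 1) 0 - m.getD k 0 > spacing)) (List.range (m.length - 1)) = cutsN spacing m from rfl]
  have hstarts : ((0 : Int) :: (((cutsN spacing m).map (fun k : Nat => (0 : Int) + k)).map (fun c => c + 1)))
      = (((0 : Nat) :: (cutsN spacing m).map Nat.succ).map (fun k : Nat => (k : Int))) := by
    simp [List.map_map, Function.comp, Nat.succ_eq_add_one]
  have hends : (((cutsN spacing m).map (fun k : Nat => (0 : Int) + k)) ++ [(m.length : Int) - 1])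
      = ((cutsN spacing m ++ [m.length - 1]).map (fun k : Nat => (k : Int))) := by
    simp [List.map_map, Function.comp]
    omega
  rw [hstarts, hends, List.zip_map, List.map_map]
  apply List.map_congr_left
  intro p _
  simp [Function.comp, Prod.map, PySem.List.pyGetD_natCast]

theorem B_eq_chop (a : Int) (rest : List Int) (spacing : Int) :
    find_maxima_groups_py_alt (a :: rest) spacing = chop spacing a a rest := by
  rw [B_bridge (a :: rest) spacing (by simp)]
  have hzip : ∀ (xs ys : List Nat),
      (xs.zip ys).map (fun p => [(a :: rest).getD p.1 0, (a :: rest).getD p.2 0])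
        = ((xs.map (fun k => (a :: rest).getD k 0)).zip (ys.map (fun k => (a :: rest).getD k 0))).map
            (fun p => [p.1, p.2]) := by
    intro xs ys
    rw [List.zip_map, List.map_map]
    apply List.map_congr_left
    intro p _
    simp [Function.comp, Prod.map]
  rw [hzip]
  have h1 : ((fun k => (a :: rest).getD k 0) ∘ Nat.succ) = (fun c => (a :: rest).getD (c+1) 0) := by
    funext c; simp [Function.comp, Nat.succ_eq_add_one]
  have hl : (a :: rest).getD ((a :: rest).length - 1) 0 = (a :: rest).getLast?.getD 0 := getD_last _
  simp only [List.map_cons, List.map_map, List.map_append, List.map_cons, h1,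
    List.getD_cons_zero, List.map_nil]
  rw [show [(a :: rest).getD ((a :: rest).length - 1) 0] = [(a :: rest).getLast?.getD 0] from by rw [hl]]
  exact chop_cuts spacing rest a a

-- ===== VERDICT (by name: the statement is the Claim_ definition above) =====
theorem find_maxima_groups_py_spec : Claim_unchanged_find_maxima_groups_py := by
  intro m spacing _ hpre hD
  cases m with
  | nil => exact absurd rfl hpre
  | cons a t =>
    cases t with
    | nil => exact absurd (by simp [D_find_maxima_groups_py]) hD
    | cons b r =>
      show find_maxima_groups_py _ _ = _
      rw [A_eq_chop, B_eq_chop]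

theorem find_maxima_groups_py_changed : Claim_changed_find_maxima_groups_py := by
  unfold Claim_changed_find_maxima_groups_py; decide

theorem find_maxima_groups_py_tight : Claim_exact_find_maxima_groups_py := by
  intro m spacing _ _ hD
  match m, hD with
  | [a], _ =>
    have hA : find_maxima_groups_py [a] spacing = [] := rfl
    have hB : find_maxima_groups_py_alt [a] spacing = [[a, a]] := by
      rw [B_eq_chop]; rfl
    rw [hA, hB]; simp
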